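-- pv_equiv track=rewrite | github.com/Lina-Ras/BigNumCalc | app/__init__.py | GetCorrectString
-- ===== SOURCE A (Python) =====
-- def GetCorrectString(res):
--     res = res.replace(' ', '')
--     if res.find('.') > -1:
--         main_part, float_part = res.split('.')
--     else:
--         main_part, float_part = res, '0'
--
--     output = ''
--     i = len(main_part)
--     while i >= 3:
--         output = main_part[i-3:i] + ' ' + output
--         i -= 3
--     if i > 0:
--         output = main_part[:i] + ' ' + output
--
--     output = output.strip()
--     while len(float_part) != 0 and float_part[-1] == '0':
--         float_part = float_part[:-1]
--     if float_part:
--         output += '.' + float_part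
--     return output
-- ===== SOURCE B (Python) =====
-- def GetCorrectString(res):
--     res = res.replace(' ', '')
--     dot = res.find('.')
--     if dot > -1:
--         main_part, float_part = res[:dot], res[dot + 1:]
--     else:
--         main_part, float_part = res, '0'
--
--     n = len(main_part)
--     chars = []
--     for i, c in enumerate(main_part):
--         chars.append(c)
--         r = n - 1 - i
--         if r > 0 and r % 3 == 0:
--             chars.append(' ')
--     output = ''.join(chars).strip()
--
--     float_part = float_part.rstrip('0')
--     if float_part:
--         output += '.' + float_part
--     return output
-- ===== Notes on version B (the rewrite author's own statement) =====
-- stated objective: faster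
-- what changed: B replaces A's backward while-loop (slicing 3-char groups off the right end and prepending them, then stripping the leftover separator) with a single forward pass over the integer part that emits each character and inserts a separator exactly where the remaining suffix length is a positive multiple of 3; the split uses find-and-slice instead of split-unpack and the zero trim uses str.rstrip('0') instead of a char-by-char loop.
import Mathlib
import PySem

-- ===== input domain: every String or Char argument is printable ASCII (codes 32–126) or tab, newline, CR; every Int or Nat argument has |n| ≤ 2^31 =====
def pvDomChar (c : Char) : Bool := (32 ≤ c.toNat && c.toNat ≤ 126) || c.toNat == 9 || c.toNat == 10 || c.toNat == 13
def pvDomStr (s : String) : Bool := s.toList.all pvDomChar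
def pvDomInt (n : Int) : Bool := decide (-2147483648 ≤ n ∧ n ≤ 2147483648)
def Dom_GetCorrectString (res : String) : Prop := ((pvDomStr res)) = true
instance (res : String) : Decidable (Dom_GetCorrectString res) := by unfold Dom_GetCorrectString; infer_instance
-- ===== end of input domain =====

-- B makes one forward character pass over the integer part, inserting a separator where the remaining
-- suffix length is a positive multiple of 3, instead of A's backward slice-and-prepend loop, avoiding
-- A's repeated string prepends; same values.

-- ===== PORT A =====
-- while len(float_part) != 0 and float_part[-1] == '0': float_part = float_part[:-1]
def pvATrim (fp : List Char) : List Char :=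
  if fp.length ≠ 0 ∧ PySem.List.pyGet? fp (-1) = some '0' then
    pvATrim (PySem.List.slice fp none (some (-1)))
  else fp
termination_by fp.length
decreasing_by
  rename_i h
  rw [PySem.List.slice_to_neg_one]
  have h1 := h.1
  simp only [List.length_dropLast]
  omega

-- i = len(main_part); while i >= 3: output = main_part[i-3:i] + ' ' + output; i -= 3
-- if i > 0: output = main_part[:i] + ' ' + output
def pvAGroup (m : List Char) (i : Nat) (out : List Char) : List Char :=
  if i ≥ 3 then
    pvAGroup m (i - 3) (PySem.List.slice m (some ((i : Int) - 3)) (some (i : Int)) ++ ' ' :: out)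
  else if i > 0 then
    PySem.List.slice m none (some (i : Int)) ++ ' ' :: out
  else out
termination_by i
decreasing_by omega

def GetCorrectString (res : String) : String :=
  let r := (PySem.Str.replace res " " "").toList
  let mf : List Char × List Char :=
    if PySem.Chars.find r ['.'] > -1 then
      match PySem.Chars.splitOn r ['.'] with
      | [a, b] => (a, b)
      | _ => (r, ['0'])          -- unreachable under Pre_ (Python raises ValueError on the unpack)
    else (r, ['0'])
  let output := PySem.Chars.strip (pvAGroup mf.1 mf.1.length [])
  let fp := pvATrim mf.2
  String.ofList (if fp ≠ [] then output ++ '.' :: fp else output)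

-- ===== PORT B =====
def GetCorrectString_alt (res : String) : String :=
  let r := (PySem.Str.replace res " " "").toList
  let dot := PySem.Chars.find r ['.']
  let mf : List Char × List Char :=
    if dot > -1 then
      (PySem.List.slice r none (some dot), PySem.List.slice r (some (dot + 1)) none)
    else (r, ['0'])
  let n : Int := mf.1.length
  -- for i, c in enumerate(main_part): chars.append(c); r = n-1-i; if r > 0 and r % 3 == 0: chars.append(' ')
  let chars := (PySem.List.enumerate mf.1).foldl
      (fun acc (p : Int × Char) =>
        let acc' := acc ++ [p.2]
        if n - 1 - p.1 > 0 ∧ PySem.Int.mod (n - 1 - p.1) 3 = 0 then acc' ++ [' '] else acc') []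
  -- ''.join(chars).strip(): the join of one-character pieces is the character list itself
  let output := PySem.Chars.strip chars
  -- float_part.rstrip('0'): drop the trailing run of '0' characters (exact for a single-char strip set)
  let fp := (mf.2.reverse.dropWhile (fun c => c == '0')).reverse
  String.ofList (if fp ≠ [] then output ++ '.' :: fp else output)

-- ===== PRECONDITION & SPEC =====
-- Pre_ excludes exactly the inputs with two or more '.' characters, on which Python A raises
-- ValueError ("too many values to unpack") at the split.
def Pre_GetCorrectString (res : String) : Prop :=
  res.toList.countP (fun c => c == '.') ≤ 1
instance (res : String) : Decidable (Pre_GetCorrectString res) := by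
  unfold Pre_GetCorrectString; infer_instance
def pvWitness_GetCorrectString : String := "12345.60"

def Spec_GetCorrectString (res : String) (out : String) : Prop := out = GetCorrectString_alt res
instance (res : String) (out : String) : Decidable (Spec_GetCorrectString res out) := by
  unfold Spec_GetCorrectString; infer_instance

-- ===== CLAIM (what is proved, stated in full; the proofs are below) =====
def Claim_equal_GetCorrectString : Prop :=
  ∀ (res : String), Dom_GetCorrectString res → Pre_GetCorrectString res →
    Spec_GetCorrectString res (GetCorrectString res)
-- ===== LEMMAS AND PROOFS =====

-- the string B's character pass produces: each char, then ' ' when the remaining suffix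
-- has positive length divisible by 3
def pvIns : List Char → List Char
  | [] => []
  | c :: t => c :: (if t.length > 0 ∧ t.length % 3 = 0 then ' ' :: pvIns t else pvIns t)

-- the string A's grouping loop produces before the strip (trailing separator included)
def pvF (l : List Char) : List Char := if l = [] then [] else pvIns l ++ [' ']

theorem pvIns_short (l : List Char) (h : l.length ≤ 3) : pvIns l = l := by
  cases l with
  | nil => rfl
  | cons c t =>
    have hc : ¬ (t.length > 0 ∧ t.length % 3 = 0) := by
      simp only [List.length_cons] at h; omega
    rw [pvIns, if_neg hc, pvIns_short t (by simp at h; omega)]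

theorem pvIns_append3 (l b : List Char) (hb : b.length = 3) :
    pvIns (l ++ b) = (if l = [] then [] else pvIns l ++ [' ']) ++ b := by
  induction l with
  | nil => simp [pvIns_short b (by omega)]
  | cons c t ih =>
    by_cases ht : t = []
    · subst ht
      rw [List.cons_append, List.nil_append, pvIns,
        if_pos (show b.length > 0 ∧ b.length % 3 = 0 by rw [hb]; omega),
        pvIns_short b (by omega)]
      simp [pvIns]
    · have htpos : t.length > 0 := List.length_pos_of_ne_nil ht
      rw [List.cons_append, pvIns]
      conv_rhs => rw [if_neg (show ¬ (c :: t = []) by simp), pvIns]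
      by_cases h3 : t.length % 3 = 0
      · rw [if_pos (show (t ++ b).length > 0 ∧ (t ++ b).length % 3 = 0 by
            rw [List.length_append, hb]; omega)]
        rw [ih, if_neg ht, if_pos (show t.length > 0 ∧ t.length % 3 = 0 from ⟨htpos, h3⟩)]
        simp
      · rw [if_neg (show ¬ ((t ++ b).length > 0 ∧ (t ++ b).length % 3 = 0) by
            rw [List.length_append, hb]; omega)]
        rw [ih, if_neg ht, if_neg (show ¬ (t.length > 0 ∧ t.length % 3 = 0) by omega)]
        simp

theorem pvF_append3 (l b : List Char) (hb : b.length = 3) :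
    pvF (l ++ b) = pvF l ++ b ++ [' '] := by
  have hbne : b ≠ [] := by intro h; rw [h] at hb; simp at hb
  by_cases hl : l = []
  · subst hl
    simp [pvF, hbne, pvIns_short b (by omega)]
  · have h1 : l ++ b ≠ [] := by simp [hl]
    rw [pvF, if_neg h1, pvIns_append3 l b hb, if_neg hl, pvF, if_neg hl]

theorem pvAGroup_take (m : List Char) (i : Nat) (hi : i ≤ m.length) (out : List Char) :
    pvAGroup m i out = pvF (m.take i) ++ out := by
  induction i using Nat.strong_induction_on generalizing out with
  | _ i ih =>
    rw [pvAGroup]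
    by_cases h3 : i ≥ 3
    · rw [if_pos h3]
      have hsl : PySem.List.slice m (some ((i : Int) - 3)) (some (i : Int)) =
          (m.take i).drop (i - 3) := by
        rw [show ((i : Int) - 3) = ((i - 3 : Nat) : Int) by omega, PySem.List.slice_natCast,
          List.drop_take, show i - (i - 3) = 3 by omega]
      have hb : ((m.take i).drop (i - 3)).length = 3 := by
        rw [List.length_drop, List.length_take, Nat.min_eq_left hi]
        omega
      have htt : (m.take i).take (i - 3) = m.take (i - 3) := by
        rw [List.take_take, Nat.min_eq_left (by omega)]
      have hsplit2 : pvF (m.take i) =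
          pvF (m.take (i - 3)) ++ (m.take i).drop (i - 3) ++ [' '] := by
        conv_lhs => rw [← List.take_append_drop (i - 3) (m.take i)]
        rw [pvF_append3 _ _ hb, htt]
      rw [hsl, ih (i - 3) (by omega) (by omega), hsplit2]
      simp
    · rw [if_neg h3]
      by_cases h0 : i > 0
      · rw [if_pos h0, PySem.List.slice_to_natCast]
        have hlen : (m.take i).length = i := by
          rw [List.length_take, Nat.min_eq_left hi]
        have hne : m.take i ≠ [] := by
          intro h
          rw [h] at hlen
          simp at hlen
          omega
        rw [pvF, if_neg hne, pvIns_short _ (by rw [hlen]; omega)]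
        simp
      · rw [if_neg h0]
        have : i = 0 := by omega
        subst this
        simp [pvF]

theorem pvFold_eq (n : Int) (t : List Char) : ∀ (s : Int) (acc : List Char),
    n - s = t.length →
    (PySem.List.enumerate t s).foldl
      (fun acc (p : Int × Char) =>
        let acc' := acc ++ [p.2]
        if n - 1 - p.1 > 0 ∧ PySem.Int.mod (n - 1 - p.1) 3 = 0 then acc' ++ [' '] else acc') acc
      = acc ++ pvIns t := by
  induction t with
  | nil => intro s acc _; simp [PySem.List.enumerate, pvIns]
  | cons c u ih =>
    intro s acc h
    rw [PySem.List.enumerate_cons, List.foldl_cons]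
    have hns : n - 1 - s = (u.length : Int) := by simp at h; omega
    have hcond : (n - 1 - s > 0 ∧ PySem.Int.mod (n - 1 - s) 3 = 0) ↔
        (u.length > 0 ∧ u.length % 3 = 0) := by
      rw [hns, PySem.Int.mod_eq_emod_of_pos (by norm_num : (0:Int) < 3)]
      omega
    by_cases hc : u.length > 0 ∧ u.length % 3 = 0
    · simp only [if_pos (hcond.mpr hc)]
      rw [ih (s + 1) _ (by simp at h ⊢; omega), pvIns, if_pos hc]
      simp
    · simp only [if_neg (fun hx => hc (hcond.mp hx))]
      rw [ih (s + 1) _ (by simp at h ⊢; omega), pvIns, if_neg hc]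
      simp

theorem pvStrip_concat_space (l : List Char) :
    PySem.Chars.strip (l ++ [' ']) = PySem.Chars.strip l := by
  show PySem.Chars.rstrip (PySem.Chars.lstrip (l ++ [' '])) =
       PySem.Chars.rstrip (PySem.Chars.lstrip l)
  have hsp : PySem.Chars.isspace ' ' = true := by decide
  by_cases h : (l.dropWhile PySem.Chars.isspace).isEmpty = true
  · have h' : l.dropWhile PySem.Chars.isspace = [] := by simpa using h
    simp [PySem.Chars.lstrip, PySem.Chars.rstrip, List.dropWhile_append, h', hsp]
  · have h' : l.dropWhile PySem.Chars.isspace ≠ [] := by simpa using h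
    simp only [PySem.Chars.lstrip, List.dropWhile_append, if_neg h]
    simp [PySem.Chars.rstrip, hsp]

theorem pvStrip_main (m : List Char) :
    PySem.Chars.strip (pvF m) = PySem.Chars.strip (pvIns m) := by
  by_cases hm : m = []
  · subst hm; rfl
  · rw [pvF, if_neg hm, pvStrip_concat_space]

theorem pvSingletonInfix (c : Char) (l : List Char) : [c] <:+: l ↔ c ∈ l := by
  constructor
  · intro h
    exact h.subset (List.mem_singleton_self c)
  · intro h
    obtain ⟨sfront, tback, rfl⟩ := List.append_of_mem h
    exact ⟨sfront, tback, by simp⟩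

theorem pvFind_eq (p q : List Char) (hp : '.' ∉ p) :
    PySem.Chars.find (p ++ '.' :: q) ['.'] = (p.length : Int) := by
  have hmem : '.' ∈ p ++ '.' :: q := by simp
  have h0 : 0 ≤ PySem.Chars.find (p ++ '.' :: q) ['.'] := by
    rw [PySem.Chars.find_nonneg_iff]
    exact (pvSingletonInfix _ _).mpr hmem
  obtain ⟨hpref, hmin⟩ := PySem.Chars.find_spec h0
  set k := (PySem.Chars.find (p ++ '.' :: q) ['.']).toNat with hk
  have hle : k ≤ p.length := by
    by_contra hlt
    rw [Nat.not_le] at hlt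
    exact hmin p.length hlt (by rw [List.drop_left]; exact ⟨q, rfl⟩)
  have hget : (p ++ '.' :: q)[k]? = some '.' := by
    obtain ⟨t, ht⟩ := hpref
    rw [← List.head?_drop, ← ht]
    rfl
  have hkp : ¬ k < p.length := by
    intro hklt
    rw [List.getElem?_append_left hklt] at hget
    exact hp (List.mem_of_getElem? hget)
  omega

theorem pvATrim_eq (fp : List Char) :
    pvATrim fp = (fp.reverse.dropWhile (fun c => c == '0')).reverse := by
  have key : ∀ rv : List Char, pvATrim rv.reverse = (rv.dropWhile (fun c => c == '0')).reverse := by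
    intro rv
    induction rv with
    | nil => rw [pvATrim]; simp
    | cons c t ih =>
      rw [pvATrim]
      by_cases hc : c = '0'
      · subst hc
        have hcond : (('0' :: t).reverse.length ≠ 0 ∧
            PySem.List.pyGet? ('0' :: t).reverse (-1) = some '0') := by
          constructor
          · simp
          · rw [List.reverse_cons]
            simp [PySem.List.pyGet?, PySem.List.pyIdx?]
        rw [if_pos hcond, PySem.List.slice_to_neg_one, List.reverse_cons,
          List.dropLast_concat, ih]
        simp
      · have hget : PySem.List.pyGet? (c :: t).reverse (-1) = some c := by
          rw [List.reverse_cons]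
          simp [PySem.List.pyGet?, PySem.List.pyIdx?]
        rw [if_neg]
        · simp [hc]
        · rintro ⟨-, h2⟩
          rw [hget] at h2
          exact hc (by simpa using h2)
  have := key fp.reverse
  simpa using this

-- str.replace(' ', '') is the space-filter
theorem pvReplaceGo_eq (fuel : Nat) (l acc : List Char) (h : l.length ≤ fuel) :
    PySem.Chars.replace.go [' '] [] fuel l acc =
      acc.reverse ++ l.filter (fun c => c ≠ ' ') := by
  induction fuel generalizing l acc with
  | zero =>
    cases l with
    | nil => simp [PySem.Chars.replace.go]
    | cons c t => simp at h
  | succ f ih =>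
    cases l with
    | nil => simp [PySem.Chars.replace.go]
    | cons c t =>
      have ht : t.length ≤ f := by simpa using h
      by_cases hc : c = ' '
      · subst hc
        simp [PySem.Chars.replace.go, List.isPrefixOf, ih _ _ ht]
      · simp [PySem.Chars.replace.go, List.isPrefixOf, hc, Ne.symm hc, ih _ _ ht]

theorem pvReplace_filter (s : List Char) :
    PySem.Chars.replace s [' '] [] = s.filter (fun c => c ≠ ' ') := by
  rw [PySem.Chars.replace]
  rw [if_neg (by simp)]
  rw [pvReplaceGo_eq _ _ _ le_rfl]
  simp

theorem pvSplitGo_noSep (fuel : Nat) (l cur : List Char) (acc : List (List Char))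
    (h : l.length ≤ fuel) (hn : '.' ∉ l) :
    PySem.Chars.splitOn.go ['.'] fuel l cur acc = ((cur.reverse ++ l) :: acc).reverse := by
  induction fuel generalizing l cur acc with
  | zero => rw [PySem.Chars.splitOn.go]
  | succ f ih =>
    cases l with
    | nil => simp [PySem.Chars.splitOn.go]
    | cons c t =>
      have ht : t.length ≤ f := by simpa using h
      have hc : ¬ c = '.' := fun hcd => hn (hcd ▸ List.mem_cons_self)
      have hnt : '.' ∉ t := fun hmt => hn (List.mem_cons_of_mem _ hmt)
      rw [PySem.Chars.splitOn.go]
      rw [if_neg (by simp [List.isPrefixOf, Ne.symm hc])]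
      rw [ih _ _ _ ht hnt]
      simp

theorem pvSplitGo_pair (q : List Char) (hq : '.' ∉ q) (p : List Char) (hp : '.' ∉ p) :
    ∀ (fuel : Nat) (cur : List Char) (acc : List (List Char)),
      (p ++ '.' :: q).length < fuel →
      PySem.Chars.splitOn.go ['.'] fuel (p ++ '.' :: q) cur acc =
        (q :: (cur.reverse ++ p) :: acc).reverse := by
  induction p with
  | nil =>
    intro fuel cur acc h
    cases fuel with
    | zero => simp at h
    | succ f =>
      rw [List.nil_append, PySem.Chars.splitOn.go]
      rw [if_pos (by simp [List.isPrefixOf])]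
      rw [show ['.'].length = 1 from rfl, List.drop_one, List.tail_cons]
      rw [pvSplitGo_noSep f q [] _ (by simp at h; omega) hq]
      simp
  | cons c p' ih =>
    intro fuel cur acc h
    cases fuel with
    | zero => simp at h
    | succ f =>
      have hc : ¬ c = '.' := fun hcd => hp (hcd ▸ List.mem_cons_self)
      have hp' : '.' ∉ p' := fun hmt => hp (List.mem_cons_of_mem _ hmt)
      rw [List.cons_append, PySem.Chars.splitOn.go]
      rw [if_neg (by simp [List.isPrefixOf, Ne.symm hc])]
      rw [ih hp' f (c :: cur) acc (by simp at h ⊢; omega)]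
      simp

theorem pvSplitOn_pair (p q : List Char) (hp : '.' ∉ p) (hq : '.' ∉ q) :
    PySem.Chars.splitOn (p ++ '.' :: q) ['.'] = [p, q] := by
  rw [PySem.Chars.splitOn]
  rw [pvSplitGo_pair q hq p hp _ [] [] (by omega)]
  simp

theorem pvFirstSplit (r : List Char) (hm : '.' ∈ r)
    (hc : r.countP (fun c => c == '.') ≤ 1) :
    ∃ q, r = r.takeWhile (fun c => c ≠ '.') ++ '.' :: q ∧ '.' ∉ q := by
  induction r with
  | nil => simp at hm
  | cons c t ih =>
    by_cases hcd : c = '.'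
    · subst hcd
      refine ⟨t, by simp, ?_⟩
      intro hmem
      have h0 : t.countP (fun c => c == '.') = 0 := by
        have hcc : (('.' : Char) :: t).countP (fun c => c == '.') =
            t.countP (fun c => c == '.') + 1 := by
          simp
        rw [hcc] at hc
        omega
      have := List.countP_eq_zero.mp h0 '.' hmem
      simp at this
    · have hm' : '.' ∈ t := by
        cases hm with
        | head => exact absurd rfl hcd
        | tail _ h => exact h
      have hc' : t.countP (fun c => c == '.') ≤ 1 := by
        rw [List.countP_cons] at hc
        omega
      obtain ⟨q, hq1, hq2⟩ := ih hm' hc'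
      refine ⟨q, ?_, hq2⟩
      rw [List.takeWhile_cons_of_pos (by simp [hcd])]
      rw [List.cons_append]
      exact congrArg (c :: ·) hq1

-- both sides assembled, given the same main part m and float part fp
theorem pvAssemble (m fp : List Char) :
    String.ofList (if pvATrim fp ≠ [] then
        PySem.Chars.strip (pvAGroup m m.length []) ++ '.' :: pvATrim fp
      else PySem.Chars.strip (pvAGroup m m.length [])) =
    String.ofList (if (fp.reverse.dropWhile (fun c => c == '0')).reverse ≠ [] then
        PySem.Chars.strip ((PySem.List.enumerate m).foldl
          (fun acc (p : Int × Char) =>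
            let acc' := acc ++ [p.2]
            if (m.length : Int) - 1 - p.1 > 0 ∧
                PySem.Int.mod ((m.length : Int) - 1 - p.1) 3 = 0 then acc' ++ [' '] else acc') []) ++
          '.' :: (fp.reverse.dropWhile (fun c => c == '0')).reverse
      else
        PySem.Chars.strip ((PySem.List.enumerate m).foldl
          (fun acc (p : Int × Char) =>
            let acc' := acc ++ [p.2]
            if (m.length : Int) - 1 - p.1 > 0 ∧
                PySem.Int.mod ((m.length : Int) - 1 - p.1) 3 = 0 then acc' ++ [' '] else acc') [])) := by
  rw [pvATrim_eq, pvAGroup_take m m.length le_rfl, List.append_nil, List.take_length,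
    pvFold_eq (m.length : Int) m 0 [] (by simp), List.nil_append, pvStrip_main]

-- ===== VERDICT (by name: the statement is the Claim_ definition above) =====
theorem GetCorrectString_spec : Claim_equal_GetCorrectString := by
  intro res _ hpre
  unfold Spec_GetCorrectString
  simp only [GetCorrectString, GetCorrectString_alt]
  have hrr : (PySem.Str.replace res " " "").toList = res.toList.filter (fun c => c ≠ ' ') := by
    rw [PySem.Str.toList_replace, show " ".toList = [' '] from rfl,
      show "".toList = ([] : List Char) from rfl, pvReplace_filter]
  rw [hrr]
  set r := res.toList.filter (fun c => c ≠ ' ') with hr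
  by_cases hin : '.' ∈ r
  · have h1 : res.toList.countP (fun c => c == '.') ≤ 1 := hpre
    have hcnt : r.countP (fun c => c == '.') ≤ 1 :=
      le_trans (List.Sublist.countP_le List.filter_sublist) h1
    obtain ⟨q, hdec, hq⟩ := pvFirstSplit _ hin hcnt
    set p := r.takeWhile (fun c => c ≠ '.') with hpdef
    have hp : '.' ∉ p := by
      intro hmemtw
      have := List.mem_takeWhile_imp hmemtw
      simp at this
    have hfind : PySem.Chars.find r ['.'] = (p.length : Int) := by
      rw [hdec]; exact pvFind_eq p q hp
    have hgt : PySem.Chars.find r ['.'] > -1 := by rw [hfind]; omega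
    rw [if_pos hgt, if_pos hgt]
    have hsplit : PySem.Chars.splitOn r ['.'] = [p, q] := by
      conv_lhs => rw [hdec]
      exact pvSplitOn_pair _ _ hp hq
    have hs1 : PySem.List.slice r none (some (PySem.Chars.find r ['.'])) = p := by
      rw [hfind, PySem.List.slice_to_natCast, hdec, List.take_left]
    have hs2 : PySem.List.slice r (some (PySem.Chars.find r ['.'] + 1)) none = q := by
      rw [hfind, show (p.length : Int) + 1 = ((p.length + 1 : Nat) : Int) by omega,
        PySem.List.slice_from_natCast, hdec,
        show p ++ '.' :: q = (p ++ ['.']) ++ q by simp,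
        show p.length + 1 = (p ++ ['.']).length by simp,
        List.drop_left]
    rw [hsplit, hs1, hs2]
    exact pvAssemble p q
  · have hng : ¬ PySem.Chars.find r ['.'] > -1 := by
      have : PySem.Chars.find r ['.'] = -1 := by
        rw [PySem.Chars.find_eq_neg_one_iff]
        intro hinf
        exact hin ((pvSingletonInfix _ _).mp hinf)
      omega
    rw [if_neg hng, if_neg hng]
    exact pvAssemble r ['0']
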